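-- pv_equiv track=rewrite | github.com/OthmanEmpire/storage_university | year1/python/coursework_(anagrams)/efficiency.py | partial_anagram
-- ===== SOURCE A (Python) =====
-- def partial_anagram(str1, str2):
--
--     if(len(str1) > len(str2)):      # Condition due to function specification
--         return False
--
--     for letter1 in str1:
--         for letter2 in str2:
--
--             if(letter1 == letter2):
--                 str1 = str1.replace(letter1, '', 1)
--                 str2 = str2.replace(letter1, '', 1)
--                 break
--
--
--     if(str1 == ''):
--         return True
--     else:
--         return False
-- ===== SOURCE B (Python) =====
-- def partial_anagram(str1, str2):
--     a = sorted(str1)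
--     b = sorted(str2)
--     i = 0
--     j = 0
--     while i < len(a):
--         if j == len(b):
--             return False
--         if b[j] < a[i]:
--             j += 1
--         elif b[j] == a[i]:
--             i += 1
--             j += 1
--         else:
--             return False
--     return True
-- ===== Notes on version B (the rewrite author's own statement) =====
-- stated objective: alternative
-- what changed: B sorts both strings and checks the sub-multiset property with a single two-pointer merge walk, replacing A's nested scan over str2 with repeated one-occurrence string deletions.
import Mathlib
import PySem

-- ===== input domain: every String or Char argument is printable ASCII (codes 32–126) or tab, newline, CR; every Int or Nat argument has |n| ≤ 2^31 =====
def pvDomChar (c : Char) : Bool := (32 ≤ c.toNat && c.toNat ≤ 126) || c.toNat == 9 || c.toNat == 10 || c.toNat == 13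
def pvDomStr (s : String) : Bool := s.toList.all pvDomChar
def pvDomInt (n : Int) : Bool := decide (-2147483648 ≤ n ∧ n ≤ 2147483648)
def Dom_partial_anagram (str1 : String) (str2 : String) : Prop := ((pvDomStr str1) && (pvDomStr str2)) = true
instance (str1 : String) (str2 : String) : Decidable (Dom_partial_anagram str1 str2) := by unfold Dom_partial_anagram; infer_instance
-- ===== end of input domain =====

-- B replaces A's nested scan-and-delete passes with a single merge-style walk over the
-- two sorted character lists (objective: alternative algorithm; return value only).

-- ===== PORT A =====
-- inner 'for letter2 in str2: if letter1 == letter2: …; break' — returns whether a match was found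
def pvInnerScan (c : Char) : List Char → Bool
  | [] => false
  | d :: ds => if c = d then true else pvInnerScan c ds

-- str.replace(letter1, '', 1) for a single character = erase the first occurrence = List.erase
def pvStepA (st : List Char × List Char) (c : Char) : List Char × List Char :=
  if pvInnerScan c st.2 then (st.1.erase c, st.2.erase c) else st

def partial_anagram (str1 : String) (str2 : String) : Bool :=
  let l1 := str1.toList
  let l2 := str2.toList
  if l1.length > l2.length then false
  else
    -- the Python for-loop iterates over the ORIGINAL str1 object while rebinding str1/str2
    let st := l1.foldl pvStepA (l1, l2)
    if st.1 = [] then true else false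

-- ===== PORT B =====
-- the merge walk: while i < len(a): … (i,j advance through the two sorted lists)
def pvWalk : List Char → List Char → Bool
  | [], _ => true
  | _ :: _, [] => false
  | c :: cs, d :: ds =>
    if d < c then pvWalk (c :: cs) ds
    else if d = c then pvWalk cs ds
    else false

def partial_anagram_alt (str1 : String) (str2 : String) : Bool :=
  pvWalk (PySem.List.sorted str1.toList (fun c => c) false)
         (PySem.List.sorted str2.toList (fun c => c) false)

-- ===== PRECONDITION & SPEC =====
def Spec_partial_anagram (str1 : String) (str2 : String) (out : Bool) : Prop := out = partial_anagram_alt str1 str2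
instance (str1 : String) (str2 : String) (out : Bool) : Decidable (Spec_partial_anagram str1 str2 out) := by unfold Spec_partial_anagram; infer_instance

-- ===== CLAIM (what is proved, stated in full; the proofs are below) =====
def Claim_equal_partial_anagram : Prop := ∀ (str1 : String) (str2 : String), Dom_partial_anagram str1 str2 → Spec_partial_anagram str1 str2 (partial_anagram str1 str2)

-- ===== LEMMAS AND PROOFS =====

lemma pvInnerScan_eq_contains (c : Char) (l : List Char) : pvInnerScan c l = l.contains c := by
  induction l with
  | nil => rfl
  | cons d ds ih =>
    simp only [pvInnerScan, List.contains_cons, ih]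
    by_cases h : c = d
    · simp [h]
    · simp [h]

-- count bookkeeping for A's loop: each character type is consumed greedily and independently
lemma pvStepA_counts (l1 : List Char) :
    ∀ (r1 r2 : List Char) (x : Char),
      (l1.foldl pvStepA (r1, r2)).1.count x = r1.count x - min (l1.count x) (r2.count x) ∧
      (l1.foldl pvStepA (r1, r2)).2.count x = r2.count x - min (l1.count x) (r2.count x) := by
  induction l1 with
  | nil => intro r1 r2 x; simp
  | cons c cs ih =>
    intro r1 r2 x
    simp only [List.foldl_cons, pvStepA, pvInnerScan_eq_contains]
    by_cases hmem : c ∈ r2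
    · rw [if_pos (by simpa using hmem)]
      obtain ⟨h1, h2⟩ := ih (r1.erase c) (r2.erase c) x
      have hc2 : 0 < r2.count c := List.count_pos_iff.mpr hmem
      by_cases hx : x = c
      · subst hx
        rw [h1, h2] at *
        simp only [List.count_erase_self, List.count_cons_self]
        constructor <;> omega
      · have hce : List.count x (r1.erase c) = List.count x r1 := List.count_erase_of_ne hx
        have hce2 : List.count x (r2.erase c) = List.count x r2 := List.count_erase_of_ne hx
        have hcc : List.count x (c :: cs) = List.count x cs := by
          simp [Ne.symm hx]
        rw [h1, h2, hce, hce2, hcc]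
        exact ⟨rfl, rfl⟩
    · rw [if_neg (by simpa using hmem)]
      obtain ⟨h1, h2⟩ := ih r1 r2 x
      by_cases hx : x = c
      · subst hx
        have hc2 : r2.count x = 0 := List.count_eq_zero.mpr hmem
        rw [h1, h2, hc2, List.count_cons_self]
        constructor <;> omega
      · have hcc : List.count x (c :: cs) = List.count x cs := by
          simp [Ne.symm hx]
        rw [h1, h2, hcc]
        exact ⟨rfl, rfl⟩

-- A (ignoring the length guard) tests the sub-multiset condition
lemma partial_anagram_loop_iff (l1 l2 : List Char) :
    (l1.foldl pvStepA (l1, l2)).1 = [] ↔ ∀ x, l1.count x ≤ l2.count x := by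
  constructor
  · intro h x
    have := (pvStepA_counts l1 l1 l2 x).1
    rw [h] at this
    simp only [List.count_nil] at this
    omega
  · intro h
    rcases hres : (l1.foldl pvStepA (l1, l2)).1 with _ | ⟨y, ys⟩
    · rfl
    · exfalso
      have hy := (pvStepA_counts l1 l1 l2 y).1
      rw [hres] at hy
      rw [List.count_cons_self] at hy
      have := h y
      omega

-- all elements of a sorted cons list are ≥ its head, so a smaller char has count 0
lemma count_eq_zero_of_lt_head (c d : Char) (ds : List Char)
    (hb : (d :: ds).Pairwise (· ≤ ·)) (hcd : c < d) : (d :: ds).count c = 0 := by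
  apply List.count_eq_zero.mpr
  intro hmem
  rcases List.mem_cons.mp hmem with h1 | h1
  · exact absurd (h1 ▸ hcd) (lt_irrefl _)
  · exact absurd (lt_of_lt_of_le hcd ((List.pairwise_cons.mp hb).1 _ h1)) (lt_irrefl _)

lemma pvWalk_iff (a b : List Char) (ha : a.Pairwise (· ≤ ·)) (hb : b.Pairwise (· ≤ ·)) :
    pvWalk a b = true ↔ ∀ x, a.count x ≤ b.count x := by
  induction a, b using pvWalk.induct with
  | case1 b => simp [pvWalk]
  | case2 c cs =>
    simp only [pvWalk, Bool.false_eq_true, false_iff, not_forall]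
    exact ⟨c, by simp [List.count_cons_self]⟩
  | case3 c cs d ds hdc ih =>
    rw [pvWalk, if_pos hdc]
    rw [ih ha (List.Pairwise.of_cons hb)]
    constructor
    · intro h x
      by_cases hx : x = d
      · subst hx
        rw [count_eq_zero_of_lt_head x c cs ha hdc]
        exact Nat.zero_le _
      · have hxd : List.count x (d :: ds) = List.count x ds := by
          simp [Ne.symm hx]
        rw [hxd]; exact h x
    · intro h x
      by_cases hx : x = d
      · subst hx
        rw [count_eq_zero_of_lt_head x c cs ha hdc]
        exact Nat.zero_le _
      · have hxd : List.count x (d :: ds) = List.count x ds := by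
          simp [Ne.symm hx]
        rw [← hxd]; exact h x
  | case4 cs d ds hdd ih =>
    rw [pvWalk, if_neg hdd, if_pos rfl]
    rw [ih (List.Pairwise.of_cons ha) (List.Pairwise.of_cons hb)]
    constructor
    · intro h x
      have := h x
      simp only [List.count_cons]
      omega
    · intro h x
      have := h x
      simp only [List.count_cons] at this
      omega
  | case5 c cs d ds hdc hdceq =>
    have hcd : c < d := lt_of_le_of_ne (le_of_not_gt hdc) (fun h => hdceq h.symm)
    rw [pvWalk, if_neg hdc, if_neg hdceq]
    simp only [Bool.false_eq_true, false_iff, not_forall]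
    refine ⟨c, ?_⟩
    rw [count_eq_zero_of_lt_head c d ds hb hcd, List.count_cons_self]
    omega

lemma alt_iff (str1 str2 : String) :
    partial_anagram_alt str1 str2 = true ↔ ∀ x, str1.toList.count x ≤ str2.toList.count x := by
  unfold partial_anagram_alt
  rw [pvWalk_iff _ _ (PySem.List.sorted_pairwise str1.toList (fun c => c))
        (PySem.List.sorted_pairwise str2.toList (fun c => c))]
  constructor <;> intro h x <;>
    simpa [List.Perm.count_eq (PySem.List.sorted_perm str1.toList (fun c => c) false),
           List.Perm.count_eq (PySem.List.sorted_perm str2.toList (fun c => c) false)] using h x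

lemma counts_le_length (l1 l2 : List Char) (h : ∀ x, l1.count x ≤ l2.count x) :
    l1.length ≤ l2.length := by
  have : (l1 : Multiset Char) ≤ (l2 : Multiset Char) := by
    rw [Multiset.le_iff_count]; intro a; simpa using h a
  simpa using Multiset.card_le_card this

-- ===== VERDICT (by name: the statement is the Claim_ definition above) =====
theorem partial_anagram_spec : Claim_equal_partial_anagram := by
  intro str1 str2 _
  unfold Spec_partial_anagram partial_anagram
  simp only []
  by_cases hlen : str1.toList.length > str2.toList.length
  · rw [if_pos hlen]
    by_cases halt : partial_anagram_alt str1 str2 = true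
    · exact absurd (counts_le_length _ _ ((alt_iff str1 str2).mp halt)) (by omega)
    · exact (Bool.not_eq_true _).mp halt |>.symm
  · rw [if_neg hlen]
    by_cases hc : ∀ x, str1.toList.count x ≤ str2.toList.count x
    · rw [if_pos ((partial_anagram_loop_iff _ _).mpr hc)]
      exact ((alt_iff str1 str2).mpr hc).symm
    · rw [if_neg (fun h => hc ((partial_anagram_loop_iff _ _).mp h))]
      symm
      rw [Bool.eq_false_iff]
      intro h
      exact hc ((alt_iff str1 str2).mp h)
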